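-- pv_equiv track=rewrite | github.com/GreenMouth/Data-Science-Lab-Final-Project | src_cpy/lstm_base/lstm_base/lstmTesting.py | prepSequences
-- ===== SOURCE A (Python) =====
-- def prepSequences(rawText, encoding, sequenceLength = 100):
--     data = []
--     targets = []
--     for i in range(0, len(rawText) - sequenceLength, 1):
--         sequence = rawText[i: i+sequenceLength]
--         target = rawText[i + sequenceLength]
--         data.append([encoding[char] for char in sequence]) #Here we are encoding the characters to their previous assigned values
--         targets.append(encoding[target])                   #Same with the target answer
--
--     return data, targets
-- ===== SOURCE B (Python) =====
-- def prepSequences(rawText, encoding, sequenceLength = 100):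
--     # One-pass streaming sliding window: no indexing/slicing of rawText, a window
--     # of the last sequenceLength encodings is maintained incrementally.
--     data = []
--     targets = []
--     if len(rawText) > sequenceLength:
--         window = []
--         for ch in rawText:
--             code = encoding[ch]
--             if len(window) == sequenceLength:
--                 data.append(window)
--                 targets.append(code)
--                 window = (window + [code])[1:]
--             else:
--                 window = window + [code]
--     return data, targets
-- ===== Notes on version B (the rewrite author's own statement) =====
-- stated objective: alternative
-- what changed: A indexes range(len-L) and slices rawText per window; B makes one streaming pass over the characters, maintaining the sliding window of the last L encodings incrementally and emitting (window, code) whenever the window is full — no indexing or slicing of the text.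
-- intended difference: On negative sequenceLength A returns len-L rows of empty (or negative-stop-sliced) windows with targets picked by Python's negative-index wraparound, an artefact of slicing; B returns ([], []), the intended answer when no window of the requested length fits. — e.g. on prepSequences("ab", [("a", 1), ("b", 2)], -1): A returns ([[1], [], []], [2, 1, 2]), B returns ([], [])
import Mathlib
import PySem

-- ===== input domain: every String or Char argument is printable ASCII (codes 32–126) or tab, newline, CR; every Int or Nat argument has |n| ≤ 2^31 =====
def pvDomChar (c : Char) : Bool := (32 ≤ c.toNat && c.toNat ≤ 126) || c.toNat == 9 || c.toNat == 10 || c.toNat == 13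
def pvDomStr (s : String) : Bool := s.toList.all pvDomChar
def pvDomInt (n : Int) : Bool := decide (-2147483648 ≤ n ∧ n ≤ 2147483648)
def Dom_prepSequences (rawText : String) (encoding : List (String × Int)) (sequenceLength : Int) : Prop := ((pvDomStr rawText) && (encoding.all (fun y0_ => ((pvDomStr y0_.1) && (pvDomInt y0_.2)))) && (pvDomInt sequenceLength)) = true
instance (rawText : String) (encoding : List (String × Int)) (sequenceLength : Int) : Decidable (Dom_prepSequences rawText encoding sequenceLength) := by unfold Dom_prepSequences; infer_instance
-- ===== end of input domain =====

-- B replaces A's index-range loop with per-window slices by a single streaming pass over the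
-- characters that maintains the sliding window of the last sequenceLength encodings incrementally.

-- dict lookup encoding[c] for a character c (first match; default 0 only reached outside Pre_)
def pvLook (encoding : List (String × Int)) (c : Char) : Int :=
  (encoding.lookup (String.ofList [c])).getD 0

-- ===== PORT A =====
def prepSequences (rawText : String) (encoding : List (String × Int)) (sequenceLength : Int) : List (List Int) × List Int :=
  (PySem.List.pyRange 0 ((rawText.toList.length : Int) - sequenceLength) 1).foldl
    (fun (acc : List (List Int) × List Int) i =>
      let sequence := PySem.List.slice rawText.toList (some i) (some (i + sequenceLength))
      -- rawText[i + sequenceLength]: IndexError (= none) is excluded by Pre_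
      let target := PySem.List.pyGet? rawText.toList (i + sequenceLength)
      (acc.1 ++ [sequence.map (pvLook encoding)],
       acc.2 ++ [match target with | some c => pvLook encoding c | none => 0]))
    ([], [])

-- ===== PORT B =====
def prepSequences_alt (rawText : String) (encoding : List (String × Int)) (sequenceLength : Int) : List (List Int) × List Int :=
  if (rawText.toList.length : Int) > sequenceLength then
    -- state = (data, targets, window); window holds the encodings of the last chars seen
    let st := rawText.toList.foldl
      (fun (st : List (List Int) × List Int × List Int) ch =>
        let code := pvLook encoding ch
        if (st.2.2.length : Int) = sequenceLength then
          (st.1 ++ [st.2.2], st.2.1 ++ [code],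
           PySem.List.slice (st.2.2 ++ [code]) (some 1) none)   -- (window + [code])[1:]
        else (st.1, st.2.1, st.2.2 ++ [code]))
      ([], [], [])
    (st.1, st.2.1)
  else ([], [])

-- ===== PRECONDITION & SPEC =====
-- Pre_ excludes exactly the inputs where A raises: a KeyError (some character of rawText
-- missing from encoding while the loop runs) or an IndexError (sequenceLength < -len(rawText)).
def Pre_prepSequences (rawText : String) (encoding : List (String × Int)) (sequenceLength : Int) : Prop :=
  (rawText.toList.length : Int) - sequenceLength > 0 →
    (0 ≤ sequenceLength + (rawText.toList.length : Int) ∧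
     rawText.toList.all (fun c => (encoding.lookup (String.ofList [c])).isSome) = true)
instance (rawText : String) (encoding : List (String × Int)) (sequenceLength : Int) : Decidable (Pre_prepSequences rawText encoding sequenceLength) := by unfold Pre_prepSequences; infer_instance
def pvWitness_prepSequences : String × (List (String × Int)) × Int :=
  ("abca", [("a", 1), ("b", 2), ("c", 3)], 2)

-- On negative sequenceLength A returns a list of empty (or negative-stop-sliced) windows paired
-- with targets picked by Python's negative-index wraparound — an artefact of slicing; B returns
-- ([], []), the intended answer when no window of the requested length fits.
def D_prepSequences (rawText : String) (encoding : List (String × Int)) (sequenceLength : Int) : Prop :=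
  sequenceLength < 0
instance (rawText : String) (encoding : List (String × Int)) (sequenceLength : Int) : Decidable (D_prepSequences rawText encoding sequenceLength) := by unfold D_prepSequences; infer_instance

def Spec_prepSequences (rawText : String) (encoding : List (String × Int)) (sequenceLength : Int) (out : List (List Int) × List Int) : Prop := ¬ D_prepSequences rawText encoding sequenceLength → out = prepSequences_alt rawText encoding sequenceLength
instance (rawText : String) (encoding : List (String × Int)) (sequenceLength : Int) (out : List (List Int) × List Int) : Decidable (Spec_prepSequences rawText encoding sequenceLength out) := by unfold Spec_prepSequences; infer_instance

def pvDiffWitness_prepSequences : String × (List (String × Int)) × Int :=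
  ("ab", [("a", 1), ("b", 2)], -1)
def pvDiffWitnessOut_prepSequences : (List (List Int) × List Int) × (List (List Int) × List Int) :=
  (([[1], [], []], [2, 1, 2]), ([], []))

-- ===== CLAIM (what is proved, stated in full; the proofs are below) =====
def Claim_unchanged_prepSequences : Prop := ∀ (rawText : String) (encoding : List (String × Int)) (sequenceLength : Int), Dom_prepSequences rawText encoding sequenceLength → Pre_prepSequences rawText encoding sequenceLength → Spec_prepSequences rawText encoding sequenceLength (prepSequences rawText encoding sequenceLength)
def Claim_changed_prepSequences : Prop := Dom_prepSequences (pvDiffWitness_prepSequences.1) (pvDiffWitness_prepSequences.2.1) (pvDiffWitness_prepSequences.2.2) ∧ Pre_prepSequences (pvDiffWitness_prepSequences.1) (pvDiffWitness_prepSequences.2.1) (pvDiffWitness_prepSequences.2.2) ∧ D_prepSequences (pvDiffWitness_prepSequences.1) (pvDiffWitness_prepSequences.2.1) (pvDiffWitness_prepSequences.2.2) ∧ prepSequences (pvDiffWitness_prepSequences.1) (pvDiffWitness_prepSequences.2.1) (pvDiffWitness_prepSequences.2.2) = pvDiffWitnessOut_prepSequences.1 ∧ prepSequences_alt (pvDiffWitness_prepSequences.1)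 (pvDiffWitness_prepSequences.2.1) (pvDiffWitness_prepSequences.2.2) = pvDiffWitnessOut_prepSequences.2 ∧ pvDiffWitnessOut_prepSequences.1 ≠ pvDiffWitnessOut_prepSequences.2
def Claim_exact_prepSequences : Prop := ∀ (rawText : String) (encoding : List (String × Int)) (sequenceLength : Int), Dom_prepSequences rawText encoding sequenceLength → Pre_prepSequences rawText encoding sequenceLength → D_prepSequences rawText encoding sequenceLength → prepSequences rawText encoding sequenceLength ≠ prepSequences_alt rawText encoding sequenceLength

-- ===== LEMMAS AND PROOFS =====

-- A's appending loop over a pair of accumulators is a pair of maps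
theorem pv_foldl_pair_append {α β γ : Type} (f : α → β) (g : α → γ) (l : List α)
    (as : List β) (bs : List γ) :
    l.foldl (fun acc i => (acc.1 ++ [f i], acc.2 ++ [g i])) (as, bs)
      = (as ++ l.map f, bs ++ l.map g) := by
  induction l generalizing as bs with
  | nil => simp
  | cons x xs ih => simp [List.foldl_cons, ih]

-- slicing commutes with map
theorem pv_slice_map {α β : Type} (h : α → β) (xs : List α) (a b : Int) :
    PySem.List.slice (xs.map h) (some a) (some b)
      = (PySem.List.slice xs (some a) (some b)).map h := by
  simp [PySem.List.slice, PySem.List.clampIdx, List.map_drop, List.map_take]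

-- the invariant of B's streaming loop over the encoded list e (0 ≤ sequenceLength)
theorem pv_core (L : Int) (hL : 0 ≤ L) (e : List Int) :
    e.foldl (fun (st : List (List Int) × List Int × List Int) v =>
        if (st.2.2.length : Int) = L then
          (st.1 ++ [st.2.2], st.2.1 ++ [v], PySem.List.slice (st.2.2 ++ [v]) (some 1) none)
        else (st.1, st.2.1, st.2.2 ++ [v])) ([], [], [])
      = ((List.range (e.length - L.toNat)).map (fun k => (e.drop k).take L.toNat),
         (List.range (e.length - L.toNat)).map (fun k => e.getD (k + L.toNat) 0),
         e.drop (e.length - L.toNat)) := by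
  set l := L.toNat with hl
  have hLl : L = (l : Int) := by omega
  induction e using List.reverseRecOn with
  | nil => simp
  | append_singleton xs v ih =>
    rw [List.foldl_append, ih]
    by_cases hlen : l ≤ xs.length
    · -- window full: emit
      have hwl : (xs.drop (xs.length - l)).length = l := by
        simp [List.length_drop]; omega
      have hcond : ((xs.drop (xs.length - l)).length : Int) = L := by rw [hwl, hLl]
      simp only [List.foldl_cons, List.foldl_nil, hcond, if_pos]
      have hn1 : (xs ++ [v]).length - l = (xs.length - l) + 1 := by
        simp [List.length_append]; omega
      rw [hn1, List.range_succ]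
      refine Prod.ext ?_ (Prod.ext ?_ ?_) <;> simp only [List.map_append, List.map_cons, List.map_nil]
      · congr 1
        · refine List.map_congr_left fun k hk => ?_
          have hk' : k < xs.length - l := List.mem_range.mp hk
          rw [List.drop_append_of_le_length (by omega), List.take_append_of_le_length]
          simp [List.length_drop]; omega
        · rw [List.drop_append_of_le_length (by omega), List.take_append_of_le_length (by omega)]
          simp [hwl]
      · congr 1
        · refine List.map_congr_left fun k hk => ?_
          have hk' : k < xs.length - l := List.mem_range.mp hk
          rw [List.getD_append]
          omega
        · have : xs.length - l + l = xs.length := by omega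
          rw [this]
          simp [List.getD_eq_getElem?_getD]
      · rw [PySem.List.slice_from_one, ← List.drop_one,
            ← List.drop_append_of_le_length (by omega : xs.length - l ≤ xs.length), List.drop_drop]
    · -- window still filling
      have hcond : ¬ ((xs.drop (xs.length - l)).length : Int) = L := by
        simp [List.length_drop, hLl]; omega
      simp only [List.foldl_cons, List.foldl_nil, hcond]
      have h0 : xs.length - l = 0 := by omega
      have h1 : xs.length + 1 - l = 0 := by omega
      simp [h0, h1]

-- pv_core restated over the character list B actually folds over
theorem pv_core' (encoding : List (String × Int)) (L : Int) (hL : 0 ≤ L) (cs : List Char) :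
    cs.foldl (fun (st : List (List Int) × List Int × List Int) ch =>
        if (st.2.2.length : Int) = L then
          (st.1 ++ [st.2.2], st.2.1 ++ [pvLook encoding ch],
           PySem.List.slice (st.2.2 ++ [pvLook encoding ch]) (some 1) none)
        else (st.1, st.2.1, st.2.2 ++ [pvLook encoding ch])) ([], [], [])
      = ((List.range (cs.length - L.toNat)).map (fun k => ((cs.map (pvLook encoding)).drop k).take L.toNat),
         (List.range (cs.length - L.toNat)).map (fun k => (cs.map (pvLook encoding)).getD (k + L.toNat) 0),
         (cs.map (pvLook encoding)).drop (cs.length - L.toNat)) := by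
  have h := pv_core L hL (cs.map (pvLook encoding))
  rw [List.foldl_map] at h
  simpa using h

-- B's fold never emits when sequenceLength is negative
theorem pv_no_emit (L : Int) (hL : L < 0) (e : List Int) : ∀ (W : List Int),
    e.foldl (fun (st : List (List Int) × List Int × List Int) v =>
        if (st.2.2.length : Int) = L then
          (st.1 ++ [st.2.2], st.2.1 ++ [v], PySem.List.slice (st.2.2 ++ [v]) (some 1) none)
        else (st.1, st.2.1, st.2.2 ++ [v])) ([], [], W) = ([], [], W ++ e) := by
  induction e with
  | nil => simp
  | cons x xs ih =>
    intro W
    have hne : ¬ ((W.length : Int) = L) := by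
      have : (0:Int) ≤ (W.length : Int) := by positivity
      omega
    simp only [List.foldl_cons, if_neg hne]
    rw [ih (W ++ [x])]
    simp

-- pv_no_emit restated over the character list B actually folds over
theorem pv_no_emit' (encoding : List (String × Int)) (L : Int) (hL : L < 0) (cs : List Char) :
    cs.foldl (fun (st : List (List Int) × List Int × List Int) ch =>
        if (st.2.2.length : Int) = L then
          (st.1 ++ [st.2.2], st.2.1 ++ [pvLook encoding ch],
           PySem.List.slice (st.2.2 ++ [pvLook encoding ch]) (some 1) none)
        else (st.1, st.2.1, st.2.2 ++ [pvLook encoding ch])) ([], [], [])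
      = ([], [], cs.map (pvLook encoding)) := by
  have h := pv_no_emit L hL (cs.map (pvLook encoding)) []
  rw [List.foldl_map] at h
  simpa using h

-- ===== VERDICT (by name: the statement is the Claim_ definition above) =====
theorem prepSequences_spec : Claim_unchanged_prepSequences := by
  intro rawText encoding L _ _
  unfold Spec_prepSequences
  intro hD
  unfold D_prepSequences at hD
  have hL : 0 ≤ L := by omega
  unfold prepSequences prepSequences_alt
  by_cases hn : (rawText.toList.length : Int) - L ≤ 0
  · rw [PySem.List.pyRange_one_eq_nil (by omega), if_neg (by omega)]
    rfl
  · rw [if_pos (by omega)]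
    simp only []
    rw [pv_core' encoding L hL]
    rw [pv_foldl_pair_append]
    rw [PySem.List.pyRange_one]
    set m := rawText.toList.length with hm
    have hLl : L = ((L.toNat : Nat) : Int) := by omega
    have htn : (((m:Int) - L - 0).toNat) = m - L.toNat := by omega
    refine Prod.ext ?_ ?_ <;> simp only [List.nil_append, List.map_map, htn]
    · refine List.map_congr_left fun k hk => ?_
      have hk' : k < m - L.toNat := List.mem_range.mp hk
      simp only [Function.comp]
      rw [← pv_slice_map, zero_add, hLl, PySem.List.slice_natCast_add, Int.toNat_natCast]
    · refine List.map_congr_left fun k hk => ?_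
      have hk' : k < m - L.toNat := List.mem_range.mp hk
      simp only [Function.comp]
      have hi : (0:Int) + (k:Int) + L = ((k + L.toNat : Nat) : Int) := by push_cast; omega
      rw [hi, PySem.List.pyGet?_natCast]
      have hlt : k + L.toNat < rawText.toList.length := by omega
      rw [List.getElem?_eq_getElem hlt]
      simp [List.getD_eq_getElem?_getD, List.getElem?_map, List.getElem?_eq_getElem hlt]

theorem prepSequences_changed : Claim_changed_prepSequences := by
  unfold Claim_changed_prepSequences; decide

theorem prepSequences_tight : Claim_exact_prepSequences := by
  intro rawText encoding L _ _ hD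
  unfold D_prepSequences at hD
  have h0 : (0:Int) ≤ (rawText.toList.length : Int) := Int.natCast_nonneg _
  intro heq
  have h1 := congrArg Prod.fst heq
  unfold prepSequences prepSequences_alt at h1
  rw [pv_foldl_pair_append, if_pos (by omega)] at h1
  simp only [] at h1
  rw [pv_no_emit' encoding L hD rawText.toList] at h1
  rw [PySem.List.pyRange_one_cons (by omega)] at h1
  simp at h1
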